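-- pv_equiv track=rewrite | github.com/Sandeeprdy1729/openenv_hackathon | environment.py | _mock_translate
-- ===== SOURCE A (Python) =====
-- def _mock_translate(text: str, target_lang: str) -> str:
--     translations = {
--         "es": {
--             "urgent": "urgente",
--             "account": "cuenta",
--             "verify": "verificar",
--             "suspended": "suspendido",
--             "click": "hacer clic",
--         },
--         "fr": {
--             "urgent": "urgent",
--             "account": "compte",
--             "verify": "vérifier",
--             "suspended": "suspendu",
--             "click": "cliquez",
--         },
--         "malayalam": {
--             "urgent": "അടിയന്തരം",
--             "account": "അക്കൗണ്ട്",
--             "verify": "പരിശോധിക്കുക",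
--             "suspended": "സസ്പെന്റഡ്",
--             "click": "ക്ലിക്ക് ചെയ്യുക",
--         },
--         "turkish": {
--             "urgent": "acil",
--             "account": "hesap",
--             "verify": "doğrula",
--             "suspended": "askıya alındı",
--             "click": "tıkla",
--         },
--     }
--     lang_translations = translations.get(target_lang, {})
--     result = text
--     for eng, trans in lang_translations.items():
--         if eng in text.lower():
--             result = result.replace(eng, trans)
--     return f"[{target_lang.upper()}] {result}"
-- ===== SOURCE B (Python) =====
-- # One-pass table-driven scanner (per-language table via an if-chain, empty table
-- # short-circuits) instead of five sequential conditional str.replace passes.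
-- def _table(lang):
--     if lang == "es":
--         return [("urgent", "urgente"), ("account", "cuenta"), ("verify", "verificar"),
--                 ("suspended", "suspendido"), ("click", "hacer clic")]
--     elif lang == "fr":
--         return [("urgent", "urgent"), ("account", "compte"), ("verify", "vérifier"),
--                 ("suspended", "suspendu"), ("click", "cliquez")]
--     elif lang == "malayalam":
--         return [("urgent", "അടിയന്തരം"), ("account", "അക്കൗണ്ട്"), ("verify", "പരിശോധിക്കുക"),
--                 ("suspended", "സസ്പെന്റഡ്"), ("click", "ക്ലിക്ക് ചെയ്യുക")]
--     elif lang == "turkish":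
--         return [("urgent", "acil"), ("account", "hesap"), ("verify", "doğrula"),
--                 ("suspended", "askıya alındı"), ("click", "tıkla")]
--     else:
--         return []
--
--
-- def _fmt(lang, body):
--     return "[" + lang.upper() + "] " + body
--
--
-- def _mock_translate(text: str, target_lang: str) -> str:
--     items = _table(target_lang)
--     if not items:
--         return _fmt(target_lang, text)
--     out = []
--     i = 0
--     n = len(text)
--     while i < n:
--         for eng, trans in items:
--             if text.startswith(eng, i):
--                 out.append(trans)
--                 i += len(eng)
--                 break
--         else:
--             out.append(text[i])
--             i += 1
--     return _fmt(target_lang, "".join(out))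
-- ===== Notes on version B (the rewrite author's own statement) =====
-- stated objective: alternative
-- what changed: B replaces A's five sequential conditional str.replace passes (each rescanning the whole running string) by an if-chain table lookup (empty table short-circuits) feeding a single left-to-right table-driven scan of the original text that emits the translation of the first matching keyword at each position.
-- intended difference: For target_lang 'turkish' on texts containing 'suspendeverify' together with 'suspended' in text.lower(), A's verify-pass rewrites 'suspendeverify' to 'suspendedoğrula' and its later suspended-pass then also translates that freshly created 'suspended' occurrence (e.g. returning '... askıya alındıoğrula'), while B translates exactly the keyword occurrences of the original text ('... suspendedoğrula'), which is the intended mock-translation behaviour. — e.g. on _mock_translate("suspendeverify suspended", "turkish"): A returns "[TURKISH] askıya alındıoğrula askıya alındı", B returns "[TURKISH] suspendedoğrula askıya alındı"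
import Mathlib
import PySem

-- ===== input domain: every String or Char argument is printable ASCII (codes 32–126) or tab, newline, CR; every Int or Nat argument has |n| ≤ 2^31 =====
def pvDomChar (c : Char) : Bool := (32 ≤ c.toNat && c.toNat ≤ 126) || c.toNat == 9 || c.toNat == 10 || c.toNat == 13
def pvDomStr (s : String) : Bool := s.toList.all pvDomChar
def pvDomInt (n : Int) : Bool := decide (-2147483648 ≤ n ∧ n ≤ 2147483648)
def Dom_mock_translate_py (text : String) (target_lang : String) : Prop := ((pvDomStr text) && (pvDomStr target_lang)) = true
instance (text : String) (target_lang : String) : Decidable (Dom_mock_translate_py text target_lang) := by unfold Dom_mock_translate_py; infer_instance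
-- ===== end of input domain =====

-- B replaces A's five sequential conditional replace passes by an if-chain table lookup feeding
-- one table-driven left-to-right scan (objective: alternative single-pass algorithm); see D_
-- below for the one stated difference.

-- ===== PORT A =====
-- the nested translation dict literal of A
def pvTranslations : PySem.Dict String (PySem.Dict String String) :=
  PySem.Dict.mk
    [("es", PySem.Dict.mk [("urgent", "urgente"), ("account", "cuenta"), ("verify", "verificar"),
        ("suspended", "suspendido"), ("click", "hacer clic")]),
     ("fr", PySem.Dict.mk [("urgent", "urgent"), ("account", "compte"), ("verify", "vérifier"),
        ("suspended", "suspendu"), ("click", "cliquez")]),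
     ("malayalam", PySem.Dict.mk [("urgent", "അടിയന്തരം"), ("account", "അക്കൗണ്ട്"), ("verify", "പരിശോധിക്കുക"),
        ("suspended", "സസ്പെന്റഡ്"), ("click", "ക്ലിക്ക് ചെയ്യുക")]),
     ("turkish", PySem.Dict.mk [("urgent", "acil"), ("account", "hesap"), ("verify", "doğrula"),
        ("suspended", "askıya alındı"), ("click", "tıkla")])]

def mock_translate_py (text : String) (target_lang : String) : String :=
  let lang_translations := pvTranslations.getD target_lang PySem.Dict.empty
  let result := lang_translations.items.foldl
    (fun r p => if PySem.Chars.isIn p.1.toList (PySem.Chars.lower text.toList)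
                then PySem.Chars.replace r p.1.toList p.2.toList else r)
    text.toList
  -- f"[{target_lang.upper()}] {result}", ported by hand over List Char (exact: plain concatenation)
  String.ofList ('[' :: PySem.Chars.upper target_lang.toList ++ ']' :: ' ' :: result)

-- ===== PORT B =====
-- Source B's _table: the per-language keyword tables, an if-chain over the language name
def pvTblES : List (List Char × List Char) :=
  [("urgent".toList, "urgente".toList), ("account".toList, "cuenta".toList),
   ("verify".toList, "verificar".toList), ("suspended".toList, "suspendido".toList),
   ("click".toList, "hacer clic".toList)]
def pvTblFR : List (List Char × List Char) :=
  [("urgent".toList, "urgent".toList), ("account".toList, "compte".toList),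
   ("verify".toList, "vérifier".toList), ("suspended".toList, "suspendu".toList),
   ("click".toList, "cliquez".toList)]
def pvTblML : List (List Char × List Char) :=
  [("urgent".toList, "അടിയന്തരം".toList), ("account".toList, "അക്കൗണ്ട്".toList),
   ("verify".toList, "പരിശോധിക്കുക".toList), ("suspended".toList, "സസ്പെന്റഡ്".toList),
   ("click".toList, "ക്ലിക്ക് ചെയ്യുക".toList)]
def pvTblTR : List (List Char × List Char) :=
  [("urgent".toList, "acil".toList), ("account".toList, "hesap".toList),
   ("verify".toList, "doğrula".toList), ("suspended".toList, "askıya alındı".toList),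
   ("click".toList, "tıkla".toList)]

def pvTableFor (lang : String) : List (List Char × List Char) :=
  if lang = "es" then pvTblES
  else if lang = "fr" then pvTblFR
  else if lang = "malayalam" then pvTblML
  else if lang = "turkish" then pvTblTR
  else []

-- Source B's _fmt helper
def pvFmt (lang : String) (body : List Char) : String :=
  String.ofList ('[' :: PySem.Chars.upper lang.toList ++ ']' :: ' ' :: body)

-- Source B's while loop over the running index: fuel = number of remaining loop iterations bound
-- (the `k = []` branch only makes the recursion total; the tables contain no empty key)
def pvScanGo (items : List (List Char × List Char)) : Nat → List Char → List Char
  | _, [] => []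
  | 0, l => l
  | fuel+1, c :: t =>
    match items.find? (fun p => p.1.isPrefixOf (c :: t)) with
    | some (k, v) => if k = [] then c :: pvScanGo items fuel t
                     else v ++ pvScanGo items fuel ((c :: t).drop k.length)
    | none => c :: pvScanGo items fuel t

def mock_translate_py_alt (text : String) (target_lang : String) : String :=
  let items := pvTableFor target_lang
  if items.isEmpty then pvFmt target_lang text.toList
  else pvFmt target_lang (pvScanGo items text.toList.length text.toList)

-- ===== PRECONDITION & SPEC =====
-- For target_lang "turkish", on texts containing "suspendeverify" together with "suspended" in
-- text.lower(), A's verify-pass rewrites "suspendeverify" to "suspendedoğrula" and its later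
-- suspended-pass then also translates that freshly CREATED "suspended" occurrence (returning e.g.
-- "askıya alındıoğrula"), while B translates exactly the keyword occurrences of the original text
-- ("suspendedoğrula"), which is the intended mock-translation behaviour.
def D_mock_translate_py (text : String) (target_lang : String) : Prop :=
  target_lang = "turkish" ∧ PySem.Str.isIn "suspendeverify" text = true ∧
    PySem.Str.isIn "suspended" (PySem.Str.lower text) = true
instance (text : String) (target_lang : String) : Decidable (D_mock_translate_py text target_lang) := by
  unfold D_mock_translate_py; infer_instance

def Spec_mock_translate_py (text : String) (target_lang : String) (out : String) : Prop :=
  ¬ D_mock_translate_py text target_lang → out = mock_translate_py_alt text target_lang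
instance (text : String) (target_lang : String) (out : String) : Decidable (Spec_mock_translate_py text target_lang out) := by
  unfold Spec_mock_translate_py; infer_instance

def pvDiffWitness_mock_translate_py : String × String := ("suspendeverify suspended", "turkish")
def pvDiffWitnessOut_mock_translate_py : String × String :=
  ("[TURKISH] askıya alındıoğrula askıya alındı", "[TURKISH] suspendedoğrula askıya alındı")

-- ===== CLAIM (what is proved, stated in full; the proofs are below) =====
def Claim_unchanged_mock_translate_py : Prop := ∀ (text : String) (target_lang : String),
  Dom_mock_translate_py text target_lang →
    Spec_mock_translate_py text target_lang (mock_translate_py text target_lang)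
def Claim_changed_mock_translate_py : Prop :=
  Dom_mock_translate_py (pvDiffWitness_mock_translate_py.1) (pvDiffWitness_mock_translate_py.2) ∧
  D_mock_translate_py (pvDiffWitness_mock_translate_py.1) (pvDiffWitness_mock_translate_py.2) ∧
  mock_translate_py (pvDiffWitness_mock_translate_py.1) (pvDiffWitness_mock_translate_py.2) = pvDiffWitnessOut_mock_translate_py.1 ∧
  mock_translate_py_alt (pvDiffWitness_mock_translate_py.1) (pvDiffWitness_mock_translate_py.2) = pvDiffWitnessOut_mock_translate_py.2 ∧
  pvDiffWitnessOut_mock_translate_py.1 ≠ pvDiffWitnessOut_mock_translate_py.2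
def Claim_exact_mock_translate_py : Prop := ∀ (text : String) (target_lang : String),
  Dom_mock_translate_py text target_lang → D_mock_translate_py text target_lang →
    mock_translate_py text target_lang ≠ mock_translate_py_alt text target_lang

-- ===== LEMMAS AND PROOFS =====

-- generic list fact used throughout: how a prefix of an append splits
theorem pv_prefix_append_cases {t a b : List Char} (h : t <+: a ++ b) :
    t <+: a ∨ (a <+: t ∧ t.drop a.length <+: b) := by
  by_cases hl : t.length ≤ a.length
  · exact Or.inl (List.prefix_of_prefix_length_le h (List.prefix_append a b) hl)
  · right
    have ha : a <+: t :=
      List.prefix_of_prefix_length_le (List.prefix_append a b) h (by omega)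
    refine ⟨ha, ?_⟩
    obtain ⟨t', rfl⟩ := ha
    obtain ⟨r, hr⟩ := h
    rw [List.append_assoc] at hr
    have := List.append_cancel_left hr
    rw [List.drop_left]
    exact ⟨r, this⟩

-- the scanner of Source B, fuel-free view
def pvScan (K : List (List Char × List Char)) (cs : List Char) : List Char :=
  pvScanGo K cs.length cs

theorem pvScanGo_nil (K : List (List Char × List Char)) (f : Nat) : pvScanGo K f [] = [] := by
  cases f <;> rfl

theorem pvScanGo_fuel (K : List (List Char × List Char)) :
    ∀ (f g : Nat) (cs : List Char), cs.length ≤ f → cs.length ≤ g →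
      pvScanGo K f cs = pvScanGo K g cs := by
  intro f
  induction f with
  | zero =>
    intro g cs hf _
    have : cs = [] := List.eq_nil_of_length_eq_zero (by omega)
    subst this; rw [pvScanGo_nil, pvScanGo_nil]
  | succ f ih =>
    intro g cs hf hg
    cases cs with
    | nil => rw [pvScanGo_nil, pvScanGo_nil]
    | cons c t =>
      cases g with
      | zero => simp at hg
      | succ g' =>
        show pvScanGo K (f+1) (c :: t) = pvScanGo K (g'+1) (c :: t)
        have hf' : t.length ≤ f := by simp at hf; omega
        have hg' : t.length ≤ g' := by simp at hg; omega
        cases hfind : K.find? (fun p => p.1.isPrefixOf (c :: t)) with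
        | none =>
          simp only [pvScanGo, hfind]
          rw [ih g' t hf' hg']
        | some kv =>
          obtain ⟨k, v⟩ := kv
          simp only [pvScanGo, hfind]
          by_cases hk : k = []
          · simp only [hk, if_pos]
            rw [ih g' t hf' hg']
          · simp only [if_neg hk]
            have hkl : 0 < k.length := List.length_pos_of_ne_nil hk
            rw [ih g' _ (by simp [List.length_drop]; omega) (by simp [List.length_drop]; omega)]

theorem pvScan_match {K : List (List Char × List Char)} {cs k v : List Char}
    (h : K.find? (fun p => p.1.isPrefixOf cs) = some (k, v)) (hk : k ≠ []) (hcs : cs ≠ []) :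
    pvScan K cs = v ++ pvScan K (cs.drop k.length) := by
  obtain ⟨c, t, rfl⟩ := List.exists_cons_of_ne_nil hcs
  show pvScanGo K (t.length + 1) (c :: t) = _
  simp only [pvScanGo, h, if_neg hk]
  congr 1
  have hkl : 0 < k.length := List.length_pos_of_ne_nil hk
  exact pvScanGo_fuel K t.length _ _ (by simp [List.length_drop]; omega) le_rfl

theorem pvScan_copy {K : List (List Char × List Char)} {c : Char} {t : List Char}
    (h : K.find? (fun p => p.1.isPrefixOf (c :: t)) = none) :
    pvScan K (c :: t) = c :: pvScan K t := by
  show pvScanGo K (t.length + 1) (c :: t) = _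
  simp only [pvScanGo, h]
  rfl

theorem pvScan_empty_table (cs : List Char) : pvScan [] cs = cs := by
  induction cs with
  | nil => rfl
  | cons c t ih => rw [pvScan_copy List.find?_nil, ih]

-- Python's str.replace (nonempty pattern) IS the singleton-table scanner
def pvRep (old new cs : List Char) : List Char := pvScan [(old, new)] cs

theorem pvRep_match {old new cs : List Char} (hold : old ≠ []) (h : old <+: cs) :
    pvRep old new cs = new ++ pvRep old new (cs.drop old.length) := by
  have hcs : cs ≠ [] := by
    intro hn; subst hn; exact hold (List.prefix_nil.mp h)
  exact pvScan_match (List.find?_cons_of_pos (by simpa [List.isPrefixOf_iff_prefix] using h)) hold hcs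

theorem pvRep_copy {old new : List Char} {c : Char} {t : List Char} (h : ¬ old <+: (c :: t)) :
    pvRep old new (c :: t) = c :: pvRep old new t := by
  refine pvScan_copy ?_
  rw [List.find?_cons_of_neg (by simpa [List.isPrefixOf_iff_prefix] using h)]
  exact List.find?_nil

theorem pvReplaceGo_eq (old new : List Char) (hold : old ≠ []) :
    ∀ (f : Nat) (l acc : List Char),
      PySem.Chars.replace.go old new f l acc = acc.reverse ++ pvScanGo [(old, new)] f l := by
  intro f
  induction f with
  | zero =>
    intro l acc
    cases l with
    | nil => simp [PySem.Chars.replace.go, pvScanGo]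
    | cons c t => simp [PySem.Chars.replace.go, pvScanGo]
  | succ f ih =>
    intro l acc
    cases l with
    | nil => simp [PySem.Chars.replace.go, pvScanGo]
    | cons c t =>
      rw [PySem.Chars.replace.go]
      by_cases hp : old.isPrefixOf (c :: t)
      · simp only [if_pos hp]
        rw [ih]
        have hf1 : List.find? (fun p => p.1.isPrefixOf (c :: t)) [(old, new)] = some (old, new) :=
          List.find?_cons_of_pos (by simpa using hp)
        have hexp : pvScanGo [(old,new)] (f+1) (c :: t)
            = new ++ pvScanGo [(old,new)] f ((c :: t).drop old.length) := by
          simp only [pvScanGo, hf1, if_neg hold]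
        rw [hexp]
        simp
      · simp only [if_neg hp]
        rw [ih]
        have hf1 : List.find? (fun p => p.1.isPrefixOf (c :: t)) [(old, new)] = none := by
          rw [List.find?_cons_of_neg (by simpa using hp)]; exact List.find?_nil
        have hexp : pvScanGo [(old,new)] (f+1) (c :: t)
            = c :: pvScanGo [(old,new)] f t := by
          simp only [pvScanGo, hf1]
        rw [hexp]
        simp

theorem pvReplace_eq {old new : List Char} (s : List Char) (hold : old ≠ []) :
    PySem.Chars.replace s old new = pvRep old new s := by
  rw [PySem.Chars.replace, if_neg (by simpa [List.isEmpty_iff] using hold)]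
  simpa using pvReplaceGo_eq old new hold s.length s []

theorem pvInfix_iff_drop (sub s : List Char) : sub <:+: s ↔ ∃ j, sub <+: s.drop j := by
  rw [← PySem.Chars.isIn_iff_infix, ← PySem.Chars.exists_prefix_drop_iff_isIn]


theorem pvScan_passThrough (K : List (List Char × List Char)) :
    ∀ (b xs : List Char),
      (∀ p ∈ K, ∀ i < b.length, ¬ (b.drop i <+: p.1) ∧ ¬ (p.1 <+: b.drop i)) →
      pvScan K (b ++ xs) = b ++ pvScan K xs := by
  intro b
  induction b with
  | nil => intro xs _; simp
  | cons c b' ihb =>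
    intro xs hb
    have hfind : K.find? (fun p => p.1.isPrefixOf ((c :: b') ++ xs)) = none := by
      rw [List.find?_eq_none]
      intro p hp hpre
      rw [List.isPrefixOf_iff_prefix] at hpre
      rcases pv_prefix_append_cases hpre with h1 | ⟨h2, _⟩
      · exact (hb p hp 0 (by simp)).2 (by simpa using h1)
      · exact (hb p hp 0 (by simp)).1 (by simpa using h2)
    rw [List.cons_append, pvScan_copy (by simpa using hfind),
        ihb xs (fun p hp i hi => by simpa [List.drop_succ_cons] using hb p hp (i+1) (by simpa using hi))]
    rfl

theorem pvPref {old new : List Char} (hold : old ≠ []) :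
    ∀ (n : Nat) (cs t : List Char), cs.length ≤ n →
      (∀ s, s ≠ [] → s <:+ t → ¬ (new <+: s ∧ new ≠ s)) →
      t <+: pvRep old new cs →
      t <+: cs ∨ ∃ X Y, t = X ++ Y ∧ Y ≠ [] ∧ Y <+: new ∧ X ++ old <+: cs := by
  intro n
  induction n with
  | zero =>
    intro cs t hlen _ ht
    have : cs = [] := List.eq_nil_of_length_eq_zero (by omega)
    subst this
    left; rw [List.prefix_nil.mp ht]
  | succ n ih =>
    intro cs t hlen hC ht
    cases cs with
    | nil => left; rw [List.prefix_nil.mp ht]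
    | cons c cs' =>
      by_cases htn : t = []
      · left; subst htn; exact List.nil_prefix
      by_cases hm : old <+: (c :: cs')
      · rw [pvRep_match hold hm] at ht
        rcases pv_prefix_append_cases ht with h1 | ⟨h2, _⟩
        · exact Or.inr ⟨[], t, by simp, htn, h1, by simpa using hm⟩
        · by_cases hte : t = new
          · exact Or.inr ⟨[], t, by simp, htn, hte ▸ List.prefix_rfl, by simpa using hm⟩
          · exact absurd ⟨h2, fun h => hte h.symm⟩ (hC t htn List.suffix_rfl)
      · rw [pvRep_copy hm] at ht
        obtain ⟨d, t', rfl⟩ := List.exists_cons_of_ne_nil htn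
        rw [List.cons_prefix_cons] at ht
        obtain ⟨rfl, ht'⟩ := ht
        rcases ih cs' t' (by simpa using Nat.lt_succ_iff.mp (by simpa using hlen))
            (fun s hs hsuf => hC s hs (hsuf.trans (List.suffix_cons _ _))) ht' with h | ⟨X, Y, hXY, hY, hYn, hXo⟩
        · exact Or.inl (List.cons_prefix_cons.mpr ⟨rfl, h⟩)
        · exact Or.inr ⟨d :: X, Y, by simp [hXY], hY, hYn, List.cons_prefix_cons.mpr ⟨rfl, hXo⟩⟩

theorem pvRep_noop {old new : List Char} :
    ∀ cs, ¬ old <:+: cs → pvRep old new cs = cs := by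
  intro cs
  induction cs with
  | nil => intro _; rfl
  | cons c t ih =>
    intro hinf
    rw [pvRep_copy (fun h => hinf h.isInfix), ih (fun h => hinf (List.infix_cons h))]

theorem pvNoNew {k old new : List Char} (hold : old ≠ [])
    (hA : ¬ k <:+: new) (hB : ∀ s, s ≠ [] → s <:+ new → ¬ s <+: k)
    (hC : ∀ s, s ≠ [] → s <:+ k → s ≠ k → ¬ (new <+: s ∧ new ≠ s)) :
    ∀ (n : Nat) (cs : List Char), cs.length ≤ n → ¬ k <:+: cs →
      (∀ X Y, k = X ++ Y → X ≠ [] → Y ≠ [] → Y <+: new → ¬ (X ++ old) <:+: cs) →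
      ¬ k <:+: pvRep old new cs := by
  intro n
  induction n with
  | zero =>
    intro cs hlen hk _
    have : cs = [] := List.eq_nil_of_length_eq_zero (by omega)
    subst this; exact fun h => hk h
  | succ n ih =>
    intro cs hlen hk hXh hcontra
    cases cs with
    | nil => exact hk hcontra
    | cons c cs' =>
      by_cases hm : old <+: (c :: cs')
      · rw [pvRep_match hold hm] at hcontra
        have hrs : (c :: cs').drop old.length <:+ (c :: cs') := List.drop_suffix _ _
        rcases (pvInfix_iff_drop _ _).mp hcontra with ⟨j, hj⟩
        by_cases hjl : j < new.length
        · rw [List.drop_append_of_le_length (by omega)] at hj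
          rcases pv_prefix_append_cases hj with h1 | ⟨h2, _⟩
          · exact hA (h1.isInfix.trans (List.drop_suffix j new).isInfix)
          · refine hB (new.drop j) ?_ (List.drop_suffix j new) h2
            intro hnil
            rw [List.drop_eq_nil_iff] at hnil
            omega
        · have hsplit : (new ++ pvRep old new ((c :: cs').drop old.length)).drop j
              = (pvRep old new ((c :: cs').drop old.length)).drop (j - new.length) := by
            rw [List.drop_append]
            simp [List.drop_eq_nil_of_le (Nat.le_of_not_lt hjl)]
          rw [hsplit] at hj
          have hkinf : k <:+: pvRep old new ((c :: cs').drop old.length) :=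
            (pvInfix_iff_drop _ _).mpr ⟨_, hj⟩
          have holdlen : 0 < old.length := List.length_pos_of_ne_nil hold
          exact ih ((c :: cs').drop old.length)
            (by
              have hop := List.length_pos_of_ne_nil hold
              simp only [List.length_drop, List.length_cons]
              simp only [List.length_cons] at hlen
              omega)
            (fun h => hk (h.trans hrs.isInfix))
            (fun X Y hXY hX hY hYn h => hXh X Y hXY hX hY hYn (h.trans hrs.isInfix))
            hkinf
      · rw [pvRep_copy hm] at hcontra
        rcases (pvInfix_iff_drop _ _).mp hcontra with ⟨j, hj⟩
        cases j with
        | zero =>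
          rw [List.drop_zero] at hj
          cases k with
          | nil => exact hk List.nil_infix
          | cons d k' =>
            rw [List.cons_prefix_cons] at hj
            obtain ⟨rfl, hk'⟩ := hj
            rcases pvPref hold n cs' k' (by simpa using Nat.lt_succ_iff.mp (by simpa using hlen))
                (fun s hs hsuf => hC s hs (hsuf.trans (List.suffix_cons _ _))
                  (fun hse => by
                    have h1 := hsuf.length_le
                    have h2 : s.length = k'.length + 1 := by rw [hse]; simp
                    omega)) hk' with h | ⟨X, Y, hXY, hY, hYn, hXo⟩
            · exact hk (List.cons_prefix_cons.mpr ⟨rfl, h⟩).isInfix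
            · exact hXh (d :: X) Y (by simp [hXY]) (by simp) hY hYn
                (List.cons_prefix_cons.mpr ⟨rfl, hXo⟩).isInfix
        | succ j' =>
          rw [List.drop_succ_cons] at hj
          exact ih cs' (by simpa using Nat.lt_succ_iff.mp (by simpa using hlen))
            (fun h => hk (List.infix_cons h))
            (fun X Y hXY hX hY hYn h => hXh X Y hXY hX hY hYn (List.infix_cons h))
            ((pvInfix_iff_drop _ _).mpr ⟨_, hj⟩)

theorem pvFind?_congr {α : Type} (l : List α) (p q : α → Bool) (h : ∀ x ∈ l, p x = q x) :
    l.find? p = l.find? q := by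
  induction l with
  | nil => rfl
  | cons a l ih =>
    by_cases hpa : p a = true
    · rw [List.find?_cons_of_pos hpa, List.find?_cons_of_pos ((h a (List.mem_cons_self)).symm ▸ hpa)]
    · rw [List.find?_cons_of_neg hpa, List.find?_cons_of_neg ((h a (List.mem_cons_self)) ▸ hpa),
          ih (fun x hx => h x (List.mem_cons_of_mem a hx))]

theorem pvFuse {k0 v0 : List Char} {K : List (List Char × List Char)}
    (hold : k0 ≠ []) (hK : ∀ p ∈ K, p.1 ≠ [])
    (hpf : ∀ p ∈ K, ∀ q ∈ K, p.1 ≠ q.1 → ¬ p.1 <+: q.1)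
    (hPass : ∀ p ∈ K, ∀ i < v0.length, ¬ (v0.drop i <+: p.1) ∧ ¬ (p.1 <+: v0.drop i))
    (hF4 : ∀ p ∈ K, ∀ i < p.1.length, ¬ (p.1.drop i <+: k0) ∧ ¬ (k0 <+: p.1.drop i))
    (hC : ∀ p ∈ K, ∀ s, s ≠ [] → s <:+ p.1 → s ≠ p.1 → ¬ (v0 <+: s ∧ v0 ≠ s)) :
    ∀ (n : Nat) (cs : List Char), cs.length ≤ n →
      (∀ p ∈ K, ∀ X Y, p.1 = X ++ Y → X ≠ [] → Y ≠ [] → Y <+: v0 → ¬ (X ++ k0) <:+: cs) →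
      pvScan ((k0, v0) :: K) cs = pvScan K (pvRep k0 v0 cs) := by
  intro n
  induction n with
  | zero =>
    intro cs hlen _
    have : cs = [] := List.eq_nil_of_length_eq_zero (by omega)
    subst this; rfl
  | succ n ih =>
    intro cs hlen hX
    cases cs with
    | nil => rfl
    | cons c t =>
      have holdlen : 0 < k0.length := List.length_pos_of_ne_nil hold
      by_cases hm : k0 <+: (c :: t)
      · -- the head key matches: both sides emit v0 and continue after it
        have hfind : ((k0, v0) :: K).find? (fun p => p.1.isPrefixOf (c :: t)) = some (k0, v0) :=
          List.find?_cons_of_pos (by simpa [List.isPrefixOf_iff_prefix] using hm)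
        rw [pvScan_match hfind hold (by simp), pvRep_match hold hm,
            pvScan_passThrough K v0 _ hPass]
        congr 1
        refine ih ((c :: t).drop k0.length)
          (by simp only [List.length_drop, List.length_cons] at *; omega)
          (fun p hp X Y hXY hXn hYn hYv h =>
            hX p hp X Y hXY hXn hYn hYv (h.trans (List.drop_suffix _ _).isInfix))
      · have hcons : ((k0, v0) :: K).find? (fun p => p.1.isPrefixOf (c :: t))
            = K.find? (fun p => p.1.isPrefixOf (c :: t)) :=
          List.find?_cons_of_neg (by simpa [List.isPrefixOf_iff_prefix] using hm)
        cases hf : K.find? (fun p => p.1.isPrefixOf (c :: t)) with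
        | none =>
          -- nothing matches at the head: both sides copy c
          rw [pvScan_copy (hcons.trans hf), pvRep_copy hm]
          have hnone2 : K.find? (fun p => p.1.isPrefixOf (c :: pvRep k0 v0 t)) = none := by
            rw [List.find?_eq_none]
            intro p hp hpre
            rw [List.isPrefixOf_iff_prefix] at hpre
            obtain ⟨d, p', hdp⟩ := List.exists_cons_of_ne_nil (hK p hp)
            rw [hdp, List.cons_prefix_cons] at hpre
            obtain ⟨rfl, hp'⟩ := hpre
            rcases pvPref hold n t p' (by simpa using Nat.lt_succ_iff.mp (by simpa using hlen))
                (fun s hs hsuf => hC p hp s hs (by rw [hdp]; exact hsuf.trans (List.suffix_cons _ _))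
                  (fun hse => by
                    have h1 := hsuf.length_le
                    have h2 : s.length = p'.length + 1 := by rw [hse, hdp]; simp
                    omega)) hp' with h | ⟨X, Y, hXY, hYn, hYv, hXo⟩
            · exact (List.find?_eq_none.mp hf p hp) (by
                rw [List.isPrefixOf_iff_prefix, hdp]
                exact List.cons_prefix_cons.mpr ⟨rfl, h⟩)
            · exact hX p hp (d :: X) Y (by rw [hdp, hXY]; rfl) (by simp) hYn hYv
                (List.cons_prefix_cons.mpr ⟨rfl, hXo⟩).isInfix
          rw [pvScan_copy hnone2]
          congr 1
          exact ih t (by simpa using Nat.lt_succ_iff.mp (by simpa using hlen))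
            (fun p hp X Y hXY hXn hYn hYv h => hX p hp X Y hXY hXn hYn hYv (List.infix_cons h))
        | some kv =>
          -- some later key matches first: it is the unique match and passes through the rep
          obtain ⟨k', v'⟩ := kv
          have hk'mem : (k', v') ∈ K := List.mem_of_find?_eq_some hf
          have hk'p : k' <+: (c :: t) := by
            have := List.find?_some hf
            rwa [List.isPrefixOf_iff_prefix] at this
          have hk'ne : k' ≠ [] := hK _ hk'mem
          obtain ⟨rest, hrest⟩ := hk'p
          have hpassk : pvRep k0 v0 (c :: t) = k' ++ pvRep k0 v0 rest := by
            rw [← hrest]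
            exact pvScan_passThrough [(k0, v0)] k' rest
              (fun p hp i hi => by
                rw [List.mem_singleton] at hp
                subst hp
                exact hF4 (k', v') hk'mem i hi)
          have hiff : ∀ Z q, q ∈ K → (q.1 <+: k' ++ Z ↔ (q.1 <+: k' ∨ q.1 = k')) := by
            intro Z q hq
            constructor
            · intro h
              rcases pv_prefix_append_cases h with h1 | ⟨h2, _⟩
              · exact Or.inl h1
              · by_cases he : q.1 = k'
                · exact Or.inr he
                · exact absurd h2 (hpf (k', v') hk'mem q hq (fun hh => he hh.symm))
            · rintro (h | h)
              · exact h.trans (List.prefix_append k' Z)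
              · rw [h]; exact List.prefix_append k' Z
          have hcongr : K.find? (fun p => p.1.isPrefixOf (k' ++ pvRep k0 v0 rest)) = some (k', v') := by
            rw [pvFind?_congr K _ (fun p => p.1.isPrefixOf (k' ++ rest)) ?_]
            · rw [hrest]; exact hf
            · intro q hq
              rw [Bool.eq_iff_iff, List.isPrefixOf_iff_prefix, List.isPrefixOf_iff_prefix,
                  hiff _ q hq, hiff _ q hq]
          have hrlen : rest.length ≤ n := by
            have := congrArg List.length hrest
            simp only [List.length_append, List.length_cons] at this hlen
            have hkl : 0 < k'.length := List.length_pos_of_ne_nil hk'ne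
            omega
          have hrsuf : rest <:+ (c :: t) := ⟨k', hrest⟩
          rw [pvScan_match (hcons.trans hf) hk'ne (by simp), hpassk,
              pvScan_match hcongr hk'ne (List.append_ne_nil_of_left_ne_nil hk'ne _),
              List.drop_left]
          have hdrop : (c :: t).drop k'.length = rest := by rw [← hrest, List.drop_left]
          rw [hdrop]
          congr 1
          exact ih rest hrlen
            (fun p hp X Y hXY hXn hYn hYv h =>
              hX p hp X Y hXY hXn hYn hYv (h.trans hrsuf.isInfix))

theorem pvScanErase {k v : List Char} {L₁ L₂ : List (List Char × List Char)}
    (hkeys : ∀ p ∈ L₁ ++ L₂, p.1 ≠ []) :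
    ∀ (n : Nat) (cs : List Char), cs.length ≤ n → ¬ k <:+: cs →
      pvScan (L₁ ++ (k, v) :: L₂) cs = pvScan (L₁ ++ L₂) cs := by
  intro n
  induction n with
  | zero =>
    intro cs hlen _
    have : cs = [] := List.eq_nil_of_length_eq_zero (by omega)
    subst this; rfl
  | succ n ih =>
    intro cs hlen hk
    cases cs with
    | nil => rfl
    | cons c t =>
      have hkp : ¬ ((fun (p : List Char × List Char) => p.1.isPrefixOf (c :: t)) (k, v) = true) := by
        simp only [List.isPrefixOf_iff_prefix]
        exact fun h => hk h.isInfix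
      have hsame : (L₁ ++ (k, v) :: L₂).find? (fun p => p.1.isPrefixOf (c :: t))
          = (L₁ ++ L₂).find? (fun p => p.1.isPrefixOf (c :: t)) := by
        rw [List.find?_append, List.find?_append,
            List.find?_cons_of_neg (p := fun q : List Char × List Char => q.1.isPrefixOf (c :: t)) hkp]
      cases hf : (L₁ ++ L₂).find? (fun p => p.1.isPrefixOf (c :: t)) with
      | none =>
        rw [pvScan_copy (hsame.trans hf), pvScan_copy hf]
        congr 1
        exact ih t (by simpa using Nat.lt_succ_iff.mp (by simpa using hlen))
          (fun h => hk (List.infix_cons h))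
      | some kv =>
        obtain ⟨k', v'⟩ := kv
        have hk'ne : k' ≠ [] := hkeys _ (List.mem_of_find?_eq_some hf)
        have hk'p : k' <+: (c :: t) := by
          have := List.find?_some hf
          rwa [List.isPrefixOf_iff_prefix] at this
        have hkl : 0 < k'.length := List.length_pos_of_ne_nil hk'ne
        rw [pvScan_match (hsame.trans hf) hk'ne (by simp), pvScan_match hf hk'ne (by simp)]
        congr 1
        exact ih ((c :: t).drop k'.length)
          (by simp only [List.length_drop, List.length_cons] at *; omega)
          (fun h => hk (h.trans (List.drop_suffix _ _).isInfix))

-- index-form → quantified-form conversions for the decidable side conditions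
theorem pvB_of_idx {v q1 : List Char} (h : ∀ i < v.length, ¬ (v.drop i <+: q1)) :
    ∀ s, s ≠ [] → s <:+ v → ¬ s <+: q1 := by
  intro s hs hsuf hpre
  have heq : s = v.drop (v.length - s.length) := List.suffix_iff_eq_drop.mp hsuf
  have hl := hsuf.length_le
  have hs' : 0 < s.length := List.length_pos_of_ne_nil hs
  exact h (v.length - s.length) (by omega) (heq ▸ hpre)

theorem pvC_of_idx {v q1 : List Char} (h : ∀ i < q1.length, 0 < i → ¬ (v <+: q1.drop i ∧ v ≠ q1.drop i)) :
    ∀ s, s ≠ [] → s <:+ q1 → s ≠ q1 → ¬ (v <+: s ∧ v ≠ s) := by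
  intro s hs hsuf hsne hand
  have heq : s = q1.drop (q1.length - s.length) := List.suffix_iff_eq_drop.mp hsuf
  have hl := hsuf.length_le
  have hs' : 0 < s.length := List.length_pos_of_ne_nil hs
  have hslt : s.length < q1.length := by
    rcases Nat.lt_or_ge s.length q1.length with h' | h'
    · exact h'
    · exact absurd (hsuf.eq_of_length (by omega)) hsne
  exact h (q1.length - s.length) (by omega) (by omega) (heq ▸ hand)

theorem pvX_of_idx {v2 k0 q1 cs : List Char} (h : ∀ i < q1.length, 0 < i → ¬ (q1.drop i <+: v2)) :
    ∀ X Y, q1 = X ++ Y → X ≠ [] → Y ≠ [] → Y <+: v2 → ¬ (X ++ k0) <:+: cs := by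
  intro X Y hXY hXn hYn hYv _
  have hYeq : Y = q1.drop X.length := by rw [hXY, List.drop_left]
  have hXl : 0 < X.length := List.length_pos_of_ne_nil hXn
  have hYl : 0 < Y.length := List.length_pos_of_ne_nil hYn
  have hlen : q1.length = X.length + Y.length := by rw [hXY]; simp
  exact h X.length (by omega) hXl (hYeq ▸ hYv)

-- static separation conditions between an earlier table row x and a later row q
abbrev pvPairOK (x q : List Char × List Char) : Prop :=
  (∀ i < x.2.length, ¬ (x.2.drop i <+: q.1) ∧ ¬ (q.1 <+: x.2.drop i)) ∧
  (∀ i < q.1.length, ¬ (q.1.drop i <+: x.1) ∧ ¬ (x.1 <+: q.1.drop i)) ∧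
  (∀ i < q.1.length, 0 < i → ¬ (x.2 <+: q.1.drop i ∧ x.2 ≠ q.1.drop i)) ∧
  (¬ q.1 <:+: x.2) ∧
  (∀ i < q.1.length, 0 < i → ¬ (q.1.drop i <+: x.2))

abbrev pvStat (L : List (List Char × List Char)) : Prop :=
  (∀ x ∈ L, x.1 ≠ [] ∧ PySem.Chars.lower x.1 = x.1) ∧ L.Pairwise pvPairOK

theorem pvStat_pf {L : List (List Char × List Char)} (h : pvStat L) :
    ∀ p ∈ L, ∀ q ∈ L, p.1 ≠ q.1 → ¬ p.1 <+: q.1 := by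
  obtain ⟨helem, hpw⟩ := h
  induction L with
  | nil => intro p hp; simp at hp
  | cons x K ih =>
    rw [List.pairwise_cons] at hpw
    intro p hp q hq hne
    rcases List.mem_cons.mp hp with rfl | hp' <;> rcases List.mem_cons.mp hq with rfl | hq'
    · exact absurd rfl hne
    · have hq1 : 0 < q.1.length := List.length_pos_of_ne_nil (helem q (List.mem_cons_of_mem _ hq')).1
      have := ((hpw.1 q hq').2.1 0 hq1).2
      simpa using this
    · have hp1 : 0 < p.1.length := List.length_pos_of_ne_nil (helem p (List.mem_cons_of_mem _ hp')).1
      have := ((hpw.1 p hp').2.1 0 hp1).1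
      simpa using this
    · exact ih (fun y hy => helem y (List.mem_cons_of_mem _ hy)) hpw.2 p hp' q hq' hne

theorem pvInfix_lower {k cs : List Char} (hlow : PySem.Chars.lower k = k) (h : k <:+: cs) :
    k <:+: PySem.Chars.lower cs := by
  have hm := List.IsInfix.map PySem.Chars.lowerChar h
  rw [show List.map PySem.Chars.lowerChar k = k from hlow] at hm
  exact hm

theorem pvNotInfix_of_isIn_false {k cs : List Char} (hlow : PySem.Chars.lower k = k)
    (h : PySem.Chars.isIn k (PySem.Chars.lower cs) = false) : ¬ k <:+: cs :=
  fun hh => absurd (pvInfix_lower hlow hh) ((PySem.Chars.isIn_eq_false_iff _ _).mp h)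

-- the generic chain: A's conditional replace passes over a separated table = the one-pass scan
theorem pvMain (cs0 : List Char) :
    ∀ (L : List (List Char × List Char)) (cs : List Char), pvStat L →
      (∀ p ∈ L, PySem.Chars.isIn p.1 (PySem.Chars.lower cs0) = false → ¬ p.1 <:+: cs) →
      L.foldl (fun r p => if PySem.Chars.isIn p.1 (PySem.Chars.lower cs0) = true
          then pvRep p.1 p.2 r else r) cs = pvScan L cs := by
  intro L
  induction L with
  | nil => intro cs _ _; rw [pvScan_empty_table]; rfl
  | cons x K ih =>
    intro cs hstat hmono
    obtain ⟨helem, hpw⟩ := hstat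
    rw [List.pairwise_cons] at hpw
    obtain ⟨hx1, hxlow⟩ := helem x (List.mem_cons_self)
    have hstatK : pvStat K := ⟨fun y hy => helem y (List.mem_cons_of_mem _ hy), hpw.2⟩
    have hOK := hpw.1
    have hstep : (if PySem.Chars.isIn x.1 (PySem.Chars.lower cs0) = true
        then pvRep x.1 x.2 cs else cs) = pvRep x.1 x.2 cs := by
      by_cases hcnd : PySem.Chars.isIn x.1 (PySem.Chars.lower cs0) = true
      · rw [if_pos hcnd]
      · rw [if_neg hcnd,
            pvRep_noop cs (hmono x List.mem_cons_self (Bool.eq_false_iff.mpr hcnd))]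
    have hmono' : ∀ q ∈ K, PySem.Chars.isIn q.1 (PySem.Chars.lower cs0) = false →
        ¬ q.1 <:+: pvRep x.1 x.2 cs := by
      intro q hq hc
      obtain ⟨hO1, hO2, hO3, hO4, hO5⟩ := hOK q hq
      exact pvNoNew hx1 hO4 (pvB_of_idx (fun i hi => (hO1 i hi).1)) (pvC_of_idx hO3)
        cs.length cs le_rfl (hmono q (List.mem_cons_of_mem _ hq) hc) (pvX_of_idx hO5)
    calc (x :: K).foldl (fun r p => if PySem.Chars.isIn p.1 (PySem.Chars.lower cs0) = true
            then pvRep p.1 p.2 r else r) cs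
        = K.foldl _ (pvRep x.1 x.2 cs) := by rw [List.foldl_cons, hstep]
      _ = pvScan K (pvRep x.1 x.2 cs) := ih (pvRep x.1 x.2 cs) hstatK hmono'
      _ = pvScan ((x.1, x.2) :: K) cs := by
          refine (pvFuse hx1 (fun q hq => (helem q (List.mem_cons_of_mem _ hq)).1)
            (pvStat_pf hstatK)
            (fun q hq => (hOK q hq).1)
            (fun q hq => (hOK q hq).2.1)
            (fun q hq => pvC_of_idx (hOK q hq).2.2.1)
            cs.length cs le_rfl
            (fun q hq => pvX_of_idx (hOK q hq).2.2.2.2)).symm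
      _ = pvScan (x :: K) cs := by rw [show ((x.1, x.2) : List Char × List Char) = x from rfl]

-- proof-only split view of the turkish table
def pvTRa : List (List Char × List Char) :=
  [("urgent".toList, "acil".toList), ("account".toList, "hesap".toList),
   ("verify".toList, "doğrula".toList)]
def pvTRb : List (List Char × List Char) := [("click".toList, "tıkla".toList)]
def pvTblTR4 : List (List Char × List Char) := pvTRa ++ pvTRb

theorem pvCentral (cs0 : List Char) (L : List (List Char × List Char)) (hstat : pvStat L) :
    L.foldl (fun r p => if PySem.Chars.isIn p.1 (PySem.Chars.lower cs0) = true
        then PySem.Chars.replace r p.1 p.2 else r) cs0 = pvScan L cs0 := by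
  rw [PySem.List.foldl_congr_mem L _
      (fun r p => if PySem.Chars.isIn p.1 (PySem.Chars.lower cs0) = true
        then pvRep p.1 p.2 r else r) cs0
      (fun acc x hx => by
        show _ = if PySem.Chars.isIn x.1 (PySem.Chars.lower cs0) = true
            then pvRep x.1 x.2 acc else acc
        by_cases hcnd : PySem.Chars.isIn x.1 (PySem.Chars.lower cs0) = true
        · rw [if_pos hcnd, if_pos hcnd, pvReplace_eq acc (hstat.1 x hx).1]
        · rw [if_neg hcnd, if_neg hcnd])]
  exact pvMain cs0 L cs0 hstat (fun p hp hc => pvNotInfix_of_isIn_false (hstat.1 p hp).2 hc)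

theorem pvFuseAll {k0 v0 : List Char} {K : List (List Char × List Char)} (cs : List Char)
    (h1 : k0 ≠ []) (h2 : ∀ p ∈ K, p.1 ≠ [])
    (h3 : ∀ p ∈ K, ∀ q ∈ K, p.1 ≠ q.1 → ¬ p.1 <+: q.1)
    (h4 : ∀ p ∈ K, ∀ i < v0.length, ¬ (v0.drop i <+: p.1) ∧ ¬ (p.1 <+: v0.drop i))
    (h5 : ∀ p ∈ K, ∀ i < p.1.length, ¬ (p.1.drop i <+: k0) ∧ ¬ (k0 <+: p.1.drop i))
    (h6 : ∀ p ∈ K, ∀ i < p.1.length, 0 < i → ¬ (v0 <+: p.1.drop i ∧ v0 ≠ p.1.drop i))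
    (hX : ∀ p ∈ K, ∀ X Y, p.1 = X ++ Y → X ≠ [] → Y ≠ [] → Y <+: v0 → ¬ (X ++ k0) <:+: cs) :
    pvScan ((k0, v0) :: K) cs = pvScan K (pvRep k0 v0 cs) :=
  pvFuse h1 h2 h3 h4 h5 (fun q hq => pvC_of_idx (h6 q hq)) cs.length cs le_rfl hX

theorem pvNoNewAll {k old new : List Char} (cs : List Char) (h1 : old ≠ []) (h2 : ¬ k <:+: new)
    (h3 : ∀ i < new.length, ¬ (new.drop i <+: k))
    (h4 : ∀ i < k.length, 0 < i → ¬ (new <+: k.drop i ∧ new ≠ k.drop i))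
    (h5 : ∀ i < k.length, 0 < i → ¬ (k.drop i <+: new))
    (hk : ¬ k <:+: cs) : ¬ k <:+: pvRep old new cs :=
  pvNoNew h1 h2 (pvB_of_idx h3) (pvC_of_idx h4) cs.length cs le_rfl hk (pvX_of_idx h5)

-- A's five turkish passes, made unconditional (the skipped ones are no-ops)
theorem pvTurkFold (cs0 : List Char)
    (hsusp : PySem.Chars.isIn "suspended".toList (PySem.Chars.lower cs0) = true) :
    pvTblTR.foldl (fun r p => if PySem.Chars.isIn p.1 (PySem.Chars.lower cs0) = true
        then pvRep p.1 p.2 r else r) cs0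
      = pvRep "click".toList "tıkla".toList (pvRep "suspended".toList "askıya alındı".toList
          (pvRep "verify".toList "doğrula".toList (pvRep "account".toList "hesap".toList
            (pvRep "urgent".toList "acil".toList cs0)))) := by
  have hnof : ∀ k : List Char, PySem.Chars.lower k = k →
      PySem.Chars.isIn k (PySem.Chars.lower cs0) = false → ¬ k <:+: cs0 :=
    fun _k hl hf => pvNotInfix_of_isIn_false hl hf
  set c1 := pvRep "urgent".toList "acil".toList cs0 with hc1
  set c2 := pvRep "account".toList "hesap".toList c1 with hc2
  set c3 := pvRep "verify".toList "doğrula".toList c2 with hc3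
  set c4 := pvRep "suspended".toList "askıya alındı".toList c3 with hc4
  have st1 : (if PySem.Chars.isIn "urgent".toList (PySem.Chars.lower cs0) = true
      then pvRep "urgent".toList "acil".toList cs0 else cs0) = c1 := by
    by_cases hcnd : PySem.Chars.isIn "urgent".toList (PySem.Chars.lower cs0) = true
    · rw [if_pos hcnd]
    · rw [if_neg hcnd, hc1, pvRep_noop cs0 (hnof _ (by decide) (Bool.eq_false_iff.mpr hcnd))]
  have st2 : (if PySem.Chars.isIn "account".toList (PySem.Chars.lower cs0) = true
      then pvRep "account".toList "hesap".toList c1 else c1) = c2 := by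
    by_cases hcnd : PySem.Chars.isIn "account".toList (PySem.Chars.lower cs0) = true
    · rw [if_pos hcnd]
    · rw [if_neg hcnd, hc2, pvRep_noop c1
        (pvNoNewAll cs0 (by decide) (by decide) (by decide) (by decide) (by decide)
          (hnof _ (by decide) (Bool.eq_false_iff.mpr hcnd)))]
  have st3 : (if PySem.Chars.isIn "verify".toList (PySem.Chars.lower cs0) = true
      then pvRep "verify".toList "doğrula".toList c2 else c2) = c3 := by
    by_cases hcnd : PySem.Chars.isIn "verify".toList (PySem.Chars.lower cs0) = true
    · rw [if_pos hcnd]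
    · rw [if_neg hcnd, hc3, pvRep_noop c2
        (pvNoNewAll c1 (by decide) (by decide) (by decide) (by decide) (by decide)
          (pvNoNewAll cs0 (by decide) (by decide) (by decide) (by decide) (by decide)
            (hnof _ (by decide) (Bool.eq_false_iff.mpr hcnd))))]
  have st4 : (if PySem.Chars.isIn "suspended".toList (PySem.Chars.lower cs0) = true
      then pvRep "suspended".toList "askıya alındı".toList c3 else c3) = c4 := by
    rw [if_pos hsusp]
  have st5 : (if PySem.Chars.isIn "click".toList (PySem.Chars.lower cs0) = true
      then pvRep "click".toList "tıkla".toList c4 else c4)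
      = pvRep "click".toList "tıkla".toList c4 := by
    by_cases hcnd : PySem.Chars.isIn "click".toList (PySem.Chars.lower cs0) = true
    · rw [if_pos hcnd]
    · rw [if_neg hcnd, pvRep_noop c4
        (pvNoNewAll c3 (by decide) (by decide) (by decide) (by decide) (by decide)
          (pvNoNewAll c2 (by decide) (by decide) (by decide) (by decide) (by decide)
            (pvNoNewAll c1 (by decide) (by decide) (by decide) (by decide) (by decide)
              (pvNoNewAll cs0 (by decide) (by decide) (by decide) (by decide) (by decide)
                (hnof _ (by decide) (Bool.eq_false_iff.mpr hcnd))))))]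
  simp only [pvTblTR, List.foldl_cons, List.foldl_nil]
  rw [st1, st2, st3, st4, st5]

-- B's scan fuses the first two turkish keys unconditionally
theorem pvTurkF1 (cs0 : List Char) :
    pvScan pvTblTR cs0
      = pvScan [("account".toList, "hesap".toList), ("verify".toList, "doğrula".toList),
          ("suspended".toList, "askıya alındı".toList), ("click".toList, "tıkla".toList)]
          (pvRep "urgent".toList "acil".toList cs0) := by
  rw [show pvTblTR = ("urgent".toList, "acil".toList) ::
      [("account".toList, "hesap".toList), ("verify".toList, "doğrula".toList),
       ("suspended".toList, "askıya alındı".toList), ("click".toList, "tıkla".toList)] from rfl]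
  exact pvFuseAll cs0 (by decide) (by decide) (by decide) (by decide) (by decide) (by decide)
    (fun p hp => pvX_of_idx (by revert p hp; decide))

theorem pvTurkF2 (c1 : List Char) :
    pvScan [("account".toList, "hesap".toList), ("verify".toList, "doğrula".toList),
        ("suspended".toList, "askıya alındı".toList), ("click".toList, "tıkla".toList)] c1
      = pvScan [("verify".toList, "doğrula".toList),
          ("suspended".toList, "askıya alındı".toList), ("click".toList, "tıkla".toList)]
          (pvRep "account".toList "hesap".toList c1) :=
  pvFuseAll c1 (by decide) (by decide) (by decide) (by decide) (by decide) (by decide)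
    (fun p hp => pvX_of_idx (by revert p hp; decide))

-- turkish, case "suspended" does occur in text.lower(): full five-pass chain, using the
-- absence of "suspendeverify" to rule out the one possible cross-boundary creation
theorem pvTurkB (cs0 : List Char)
    (hsusp : PySem.Chars.isIn "suspended".toList (PySem.Chars.lower cs0) = true)
    (hpat : ¬ "suspendeverify".toList <:+: cs0) :
    pvTblTR.foldl (fun r p => if PySem.Chars.isIn p.1 (PySem.Chars.lower cs0) = true
        then pvRep p.1 p.2 r else r) cs0 = pvScan pvTblTR cs0 := by
  set c1 := pvRep "urgent".toList "acil".toList cs0 with hc1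
  set c2 := pvRep "account".toList "hesap".toList c1 with hc2
  set c3 := pvRep "verify".toList "doğrula".toList c2 with hc3
  set c4 := pvRep "suspended".toList "askıya alındı".toList c3 with hc4
  have hpat1 : ¬ "suspendeverify".toList <:+: c1 :=
    pvNoNewAll cs0 (by decide) (by decide) (by decide) (by decide) (by decide) hpat
  have hpat2 : ¬ "suspendeverify".toList <:+: c2 :=
    pvNoNewAll c1 (by decide) (by decide) (by decide) (by decide) (by decide) hpat1
  have f3 : pvScan [("verify".toList, "doğrula".toList),
          ("suspended".toList, "askıya alındı".toList), ("click".toList, "tıkla".toList)] c2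
      = pvScan [("suspended".toList, "askıya alındı".toList), ("click".toList, "tıkla".toList)] c3 := by
    refine pvFuseAll c2 (by decide) (by decide) (by decide) (by decide) (by decide) (by decide) ?_
    intro p hp
    rcases List.mem_cons.mp hp with rfl | hp'
    · intro X Y hXY hXn hYn hYv
      -- the suspended row: the only split aligning with "doğrula" is at index 8,
      -- giving exactly the excluded pattern "suspendeverify"
      have hXY' : "suspended".toList = X ++ Y := hXY
      have hYeq : Y = "suspended".toList.drop X.length := by
        rw [hXY', List.drop_left]
      have hXeq : X = "suspended".toList.take X.length := by
        rw [hXY', List.take_left]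
      have hXl : 0 < X.length := List.length_pos_of_ne_nil hXn
      have hYl : 0 < Y.length := List.length_pos_of_ne_nil hYn
      have hlen : ("suspended".toList).length = X.length + Y.length := by
        rw [hXY']; simp
      have h8 : ∀ i < ("suspended".toList).length, 0 < i →
          ("suspended".toList.drop i <+: "doğrula".toList) → i = 8 := by decide
      have hx8 : X.length = 8 := h8 X.length (by omega) hXl (hYeq ▸ hYv)
      have hXis : X = "suspende".toList := by
        rw [hXeq, hx8]; decide
      rw [hXis, show "suspende".toList ++ "verify".toList = "suspendeverify".toList from by decide]
      exact hpat2
    · exact pvX_of_idx (by revert p hp'; decide)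
  have f4 : pvScan [("suspended".toList, "askıya alındı".toList), ("click".toList, "tıkla".toList)] c3
      = pvScan [("click".toList, "tıkla".toList)] c4 :=
    pvFuseAll c3 (by decide) (by decide) (by decide) (by decide) (by decide) (by decide)
      (fun p hp => pvX_of_idx (by revert p hp; decide))
  have f5 : pvScan [("click".toList, "tıkla".toList)] c4
      = pvScan [] (pvRep "click".toList "tıkla".toList c4) :=
    pvFuseAll c4 (by decide) (by decide) (by decide) (by decide) (by decide) (by decide)
      (fun p hp => pvX_of_idx (by revert p hp; decide))
  rw [pvTurkFold cs0 hsusp, pvTurkF1 cs0, pvTurkF2, f3, f4, f5, pvScan_empty_table]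

theorem pvReplFold (cs0 : List Char) (L : List (List Char × List Char))
    (hkeys : ∀ p ∈ L, p.1 ≠ []) :
    L.foldl (fun r p => if PySem.Chars.isIn p.1 (PySem.Chars.lower cs0) = true
        then PySem.Chars.replace r p.1 p.2 else r) cs0
      = L.foldl (fun r p => if PySem.Chars.isIn p.1 (PySem.Chars.lower cs0) = true
        then pvRep p.1 p.2 r else r) cs0 :=
  PySem.List.foldl_congr_mem L _ _ cs0 (fun acc x hx => by
    show _ = if PySem.Chars.isIn x.1 (PySem.Chars.lower cs0) = true
        then pvRep x.1 x.2 acc else acc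
    by_cases hcnd : PySem.Chars.isIn x.1 (PySem.Chars.lower cs0) = true
    · rw [if_pos hcnd, if_pos hcnd, pvReplace_eq acc (hkeys x hx)]
    · rw [if_neg hcnd, if_neg hcnd])

-- turkish, case "suspended" does NOT occur in text.lower(): A skips that pass and
-- B's scan never fires that key, so both reduce to the four-row table
theorem pvTurkA (cs0 : List Char)
    (hsusp : PySem.Chars.isIn "suspended".toList (PySem.Chars.lower cs0) = false) :
    pvTblTR.foldl (fun r p => if PySem.Chars.isIn p.1 (PySem.Chars.lower cs0) = true
        then PySem.Chars.replace r p.1 p.2 else r) cs0 = pvScan pvTblTR cs0 := by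
  have hns : ¬ "suspended".toList <:+: cs0 := pvNotInfix_of_isIn_false (by decide) hsusp
  have her : pvScan pvTblTR cs0 = pvScan pvTblTR4 cs0 := by
    rw [show pvTblTR = pvTRa ++ ("suspended".toList, "askıya alındı".toList) :: pvTRb from rfl,
        show pvTblTR4 = pvTRa ++ pvTRb from rfl]
    exact pvScanErase (by decide) cs0.length cs0 le_rfl hns
  have hfold : pvTblTR.foldl (fun r p => if PySem.Chars.isIn p.1 (PySem.Chars.lower cs0) = true
        then PySem.Chars.replace r p.1 p.2 else r) cs0
      = pvTblTR4.foldl (fun r p => if PySem.Chars.isIn p.1 (PySem.Chars.lower cs0) = true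
        then PySem.Chars.replace r p.1 p.2 else r) cs0 := by
    simp only [pvTblTR, pvTblTR4, pvTRa, pvTRb, List.cons_append, List.nil_append,
      List.foldl_cons, List.foldl_nil]
    rw [if_neg (show ¬ PySem.Chars.isIn "suspended".toList (PySem.Chars.lower cs0) = true from by
      rw [hsusp]; exact Bool.false_ne_true)]
  rw [hfold, her, pvCentral cs0 pvTblTR4 (by decide)]

-- lift a core (char-level) equality from A's string-pair item list to the char-list table
theorem pvAssemble (cs0 : List Char) (S : List (String × String))
    (L : List (List Char × List Char))
    (hmap : L = S.map (fun p => (p.1.toList, p.2.toList)))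
    (hcore : L.foldl (fun r p => if PySem.Chars.isIn p.1 (PySem.Chars.lower cs0) = true
        then PySem.Chars.replace r p.1 p.2 else r) cs0 = pvScan L cs0) :
    S.foldl (fun r p => if PySem.Chars.isIn p.1.toList (PySem.Chars.lower cs0) = true
        then PySem.Chars.replace r p.1.toList p.2.toList else r) cs0
      = pvScanGo L cs0.length cs0 := by
  have h1 : S.foldl (fun r p => if PySem.Chars.isIn p.1.toList (PySem.Chars.lower cs0) = true
        then PySem.Chars.replace r p.1.toList p.2.toList else r) cs0
      = L.foldl (fun r p => if PySem.Chars.isIn p.1 (PySem.Chars.lower cs0) = true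
        then PySem.Chars.replace r p.1 p.2 else r) cs0 := by
    rw [hmap, List.foldl_map]
  rw [h1, hcore]
  rfl

-- how B's port evaluates on each known language / on an unknown one
theorem pvAltKnown (text : String) (tl : String) (L : List (List Char × List Char))
    (hT : pvTableFor tl = L) (hne : L.isEmpty = false) :
    mock_translate_py_alt text tl
      = String.ofList ('[' :: PySem.Chars.upper tl.toList ++ ']' :: ' ' ::
          pvScanGo L text.toList.length text.toList) := by
  unfold mock_translate_py_alt
  rw [hT]
  dsimp only
  rw [hne]
  rfl

theorem pvAltUnknown (text : String) (tl : String) (hT : pvTableFor tl = []) :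
    mock_translate_py_alt text tl
      = String.ofList ('[' :: PySem.Chars.upper tl.toList ++ ']' :: ' ' :: text.toList) := by
  unfold mock_translate_py_alt
  rw [hT]
  rfl

-- ===== tightness machinery: A and B REALLY differ everywhere inside D_ =====

theorem pvRep_pass {old new : List Char} (b xs : List Char)
    (h : ∀ i < b.length, ¬ (b.drop i <+: old) ∧ ¬ (old <+: b.drop i)) :
    pvRep old new (b ++ xs) = b ++ pvRep old new xs :=
  pvScan_passThrough [(old, new)] b xs (fun p hp i hi => by
    rw [List.mem_singleton] at hp; subst hp; exact h i hi)

theorem pvNotPrefBlock {key blk : List Char} (rest : List Char)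
    (h1 : ¬ key <+: blk) (h2 : ¬ blk <+: key) : ¬ key <+: blk ++ rest := fun h =>
  (pv_prefix_append_cases h).elim h1 (fun hh => h2 hh.1)

theorem pvInfixShift {pat blk rest : List Char}
    (hnp : ∀ j < blk.length, ¬ (blk.drop j <+: pat)) (hlen : blk.length < pat.length)
    (hinf : pat <:+: blk ++ rest) : pat <:+: rest := by
  rcases (pvInfix_iff_drop pat _).mp hinf with ⟨j, hj⟩
  by_cases hjb : j < blk.length
  · exfalso
    rw [List.drop_append_of_le_length (by omega)] at hj
    rcases pv_prefix_append_cases hj with h1 | ⟨h2, _⟩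
    · have := h1.length_le
      have := List.length_drop (l := blk) (i := j) ▸ this
      omega
    · exact hnp j hjb h2
  · rw [List.drop_append, List.drop_eq_nil_of_le (by omega), List.nil_append] at hj
    exact (pvInfix_iff_drop pat rest).mpr ⟨_, hj⟩

-- keyword occurrences of the original text survive an unrelated replace pass
theorem pvPreservePrefix {pat old new : List Char}
    (hA : ¬ old <:+: pat) (hB : ∀ s, s ≠ [] → s <:+ pat → ¬ s <+: old) :
    ∀ (cs u : List Char), u <:+ pat → u <+: cs → u <+: pvRep old new cs := by
  intro cs
  induction cs with
  | nil => intro u _ hu; rw [List.prefix_nil.mp hu]; exact List.nil_prefix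
  | cons c t ih =>
    intro u hus hu
    cases u with
    | nil => exact List.nil_prefix
    | cons d u' =>
      rw [List.cons_prefix_cons] at hu
      obtain ⟨rfl, hu'⟩ := hu
      have hm : ¬ old <+: (d :: t) := by
        intro hm
        by_cases hol : old.length ≤ (d :: u').length
        · exact hA ((List.prefix_of_prefix_length_le hm (List.cons_prefix_cons.mpr ⟨rfl, hu'⟩) hol).isInfix.trans hus.isInfix)
        · exact hB (d :: u') (by simp) hus
            (List.prefix_of_prefix_length_le (List.cons_prefix_cons.mpr ⟨rfl, hu'⟩) hm (by omega))
      rw [pvRep_copy hm, List.cons_prefix_cons]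
      exact ⟨rfl, ih u' ((List.suffix_cons d u').trans hus) hu'⟩

theorem pvPreserve {pat old new : List Char} (hold : old ≠ []) (hlenp : old.length < pat.length)
    (hA : ¬ old <:+: pat) (hB : ∀ s, s ≠ [] → s <:+ pat → ¬ s <+: old)
    (hC : ∀ s, s ≠ [] → s <:+ old → ¬ s <+: pat) :
    ∀ (n : Nat) (cs : List Char), cs.length ≤ n → pat <:+: cs → pat <:+: pvRep old new cs := by
  intro n
  induction n with
  | zero =>
    intro cs hlen hinf
    have : cs = [] := List.eq_nil_of_length_eq_zero (by omega)
    subst this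
    rwa [show pvRep old new [] = [] from rfl]
  | succ n ih =>
    intro cs hlen hinf
    cases cs with
    | nil => rwa [show pvRep old new [] = [] from rfl]
    | cons c t =>
      by_cases hm : old <+: (c :: t)
      · obtain ⟨rest, hrest⟩ := hm
        have hshift : pat <:+: rest := by
          refine pvInfixShift (blk := old) ?_ hlenp (hrest ▸ hinf)
          intro j hj hpre
          exact hC (old.drop j) (by
              intro hnil; rw [List.drop_eq_nil_iff] at hnil; omega)
            (List.drop_suffix j old) hpre
        have hlenr : rest.length ≤ n := by
          have := congrArg List.length hrest
          have holdl : 0 < old.length := List.length_pos_of_ne_nil hold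
          simp only [List.length_append, List.length_cons] at this hlen
          omega
        have : pat <:+: pvRep old new rest := ih rest hlenr hshift
        rw [← hrest, pvRep_match hold (List.prefix_append old rest), List.drop_left]
        exact this.trans (List.suffix_append _ _).isInfix
      · rcases (pvInfix_iff_drop pat _).mp hinf with ⟨j, hj⟩
        cases j with
        | zero =>
          rw [List.drop_zero] at hj
          exact (pvPreservePrefix hA hB (c :: t) pat List.suffix_rfl hj).isInfix
        | succ j' =>
          rw [pvRep_copy hm]
          rw [List.drop_succ_cons] at hj
          have : pat <:+: pvRep old new t :=
            ih t (by simpa using Nat.lt_succ_iff.mp (by simpa using hlen))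
              ((pvInfix_iff_drop pat t).mpr ⟨_, hj⟩)
          exact List.infix_cons this

-- wherever the original text still contains "suspendeverify", A's last three passes and
-- B's three-key scan produce DIFFERENT strings (A translates the created occurrence)
theorem pvDiff : ∀ (n : Nat) (cs : List Char), cs.length ≤ n →
    "suspendeverify".toList <:+: cs →
    pvRep "click".toList "tıkla".toList (pvRep "suspended".toList "askıya alındı".toList
        (pvRep "verify".toList "doğrula".toList cs))
      ≠ pvScan [("verify".toList, "doğrula".toList),
          ("suspended".toList, "askıya alındı".toList), ("click".toList, "tıkla".toList)] cs := by
  intro n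
  induction n with
  | zero =>
    intro cs hlen hinf
    have : cs = [] := List.eq_nil_of_length_eq_zero (by omega)
    subst this
    rw [List.infix_nil] at hinf
    exact absurd hinf (by decide)
  | succ n ih =>
    intro cs hlen hinf
    by_cases hp0 : "suspendeverify".toList <+: cs
    · -- the pattern sits at the head: A begins with "askıya alındı", B copies the 's'
      obtain ⟨r0, hr0⟩ := hp0
      subst hr0
      have hsplit : "suspendeverify".toList ++ r0
          = "suspende".toList ++ ("verify".toList ++ r0) := by
        rw [← List.append_assoc]
        exact congrArg (· ++ r0) (by decide)
      have a1 : pvRep "verify".toList "doğrula".toList ("suspendeverify".toList ++ r0)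
          = "suspende".toList ++ ("doğrula".toList ++
              pvRep "verify".toList "doğrula".toList r0) := by
        rw [hsplit, pvRep_pass _ _ (by decide),
          pvRep_match (by decide) (List.prefix_append _ _), List.drop_left]
      have hre : "suspende".toList ++ ("doğrula".toList ++
            pvRep "verify".toList "doğrula".toList r0)
          = "suspended".toList ++ ("oğrula".toList ++
              pvRep "verify".toList "doğrula".toList r0) := by
        rw [← List.append_assoc, ← List.append_assoc]
        exact congrArg (· ++ pvRep "verify".toList "doğrula".toList r0) (by decide)
      have a2 : pvRep "suspended".toList "askıya alındı".toList
            ("suspende".toList ++ ("doğrula".toList ++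
              pvRep "verify".toList "doğrula".toList r0))
          = "askıya alındı".toList ++ pvRep "suspended".toList "askıya alındı".toList
              ("oğrula".toList ++ pvRep "verify".toList "doğrula".toList r0) := by
        rw [hre, pvRep_match (by decide) (List.prefix_append _ _), List.drop_left]
      have a3 : pvRep "click".toList "tıkla".toList ("askıya alındı".toList ++
            pvRep "suspended".toList "askıya alındı".toList
              ("oğrula".toList ++ pvRep "verify".toList "doğrula".toList r0))
          = "askıya alındı".toList ++ pvRep "click".toList "tıkla".toList
              (pvRep "suspended".toList "askıya alındı".toList
                ("oğrula".toList ++ pvRep "verify".toList "doğrula".toList r0)) :=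
        pvRep_pass _ _ (by decide)
      have hcons : "suspendeverify".toList ++ r0
          = 's' :: ("uspendeverify".toList ++ r0) := by
        rw [show "suspendeverify".toList = 's' :: "uspendeverify".toList from by decide]
        rfl
      have hfind : (([("verify".toList, "doğrula".toList),
            ("suspended".toList, "askıya alındı".toList),
            ("click".toList, "tıkla".toList)] : List (List Char × List Char)).find?
            (fun p => p.1.isPrefixOf ('s' :: ("uspendeverify".toList ++ r0)))) = none := by
        rw [List.find?_eq_none]
        intro p hp hpre
        rw [List.isPrefixOf_iff_prefix, ← hcons] at hpre
        simp only [List.mem_cons, List.not_mem_nil, or_false] at hp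
        rcases hp with rfl | rfl | rfl
        · exact pvNotPrefBlock r0 (by decide) (by decide) hpre
        · exact pvNotPrefBlock r0 (by decide) (by decide) hpre
        · exact pvNotPrefBlock r0 (by decide) (by decide) hpre
      have b1 : pvScan [("verify".toList, "doğrula".toList),
            ("suspended".toList, "askıya alındı".toList), ("click".toList, "tıkla".toList)]
            ("suspendeverify".toList ++ r0)
          = 's' :: pvScan [("verify".toList, "doğrula".toList),
              ("suspended".toList, "askıya alındı".toList), ("click".toList, "tıkla".toList)]
              ("uspendeverify".toList ++ r0) := by
        rw [hcons]
        exact pvScan_copy hfind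
      rw [a1, a2, a3, b1,
        show "askıya alındı".toList = 'a' :: "skıya alındı".toList from by decide,
        List.cons_append]
      intro heq
      injection heq with h1 _
      exact absurd h1 (by decide)
    · by_cases hv : "verify".toList <+: cs
      · obtain ⟨rest, hrest⟩ := hv
        subst hrest
        have hshift : "suspendeverify".toList <:+: rest :=
          pvInfixShift (by decide) (by decide) hinf
        have hlenr : rest.length ≤ n := by
          rw [List.length_append, show ("verify".toList).length = 6 from by decide] at hlen
          omega
        rw [pvRep_match (by decide) (List.prefix_append _ _), List.drop_left,
          pvRep_pass _ _ (by decide), pvRep_pass _ _ (by decide),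
          pvScan_match (K := [("verify".toList, "doğrula".toList),
            ("suspended".toList, "askıya alındı".toList), ("click".toList, "tıkla".toList)])
            (List.find?_cons_of_pos (by
              rw [List.isPrefixOf_iff_prefix]; exact List.prefix_append _ _))
            (by decide) (List.append_ne_nil_of_left_ne_nil (by decide) _),
          List.drop_left]
        intro heq
        exact ih rest hlenr hshift (List.append_cancel_left heq)
      · by_cases hs : "suspended".toList <+: cs
        · obtain ⟨rest, hrest⟩ := hs
          subst hrest
          have hshift : "suspendeverify".toList <:+: rest :=
            pvInfixShift (by decide) (by decide) hinf
          have hlenr : rest.length ≤ n := by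
            rw [List.length_append, show ("suspended".toList).length = 9 from by decide] at hlen
            omega
          rw [pvRep_pass _ _ (by decide),
            pvRep_match (by decide) (List.prefix_append _ _), List.drop_left,
            pvRep_pass _ _ (by decide),
            pvScan_match (K := [("verify".toList, "doğrula".toList),
              ("suspended".toList, "askıya alındı".toList), ("click".toList, "tıkla".toList)])
              (by
                rw [List.find?_cons_of_neg (by
                  rw [List.isPrefixOf_iff_prefix]
                  exact pvNotPrefBlock rest (by decide) (by decide))]
                exact List.find?_cons_of_pos (by
                  rw [List.isPrefixOf_iff_prefix]; exact List.prefix_append _ _))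
              (by decide) (List.append_ne_nil_of_left_ne_nil (by decide) _),
            List.drop_left]
          intro heq
          exact ih rest hlenr hshift (List.append_cancel_left heq)
        · by_cases hc : "click".toList <+: cs
          · obtain ⟨rest, hrest⟩ := hc
            subst hrest
            have hshift : "suspendeverify".toList <:+: rest :=
              pvInfixShift (by decide) (by decide) hinf
            have hlenr : rest.length ≤ n := by
              rw [List.length_append, show ("click".toList).length = 5 from by decide] at hlen
              omega
            rw [pvRep_pass _ _ (by decide), pvRep_pass _ _ (by decide),
              pvRep_match (by decide) (List.prefix_append _ _), List.drop_left,
              pvScan_match (K := [("verify".toList, "doğrula".toList),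
                ("suspended".toList, "askıya alındı".toList), ("click".toList, "tıkla".toList)])
                (by
                  rw [List.find?_cons_of_neg (by
                    rw [List.isPrefixOf_iff_prefix]
                    exact pvNotPrefBlock rest (by decide) (by decide)),
                    List.find?_cons_of_neg (by
                    rw [List.isPrefixOf_iff_prefix]
                    exact pvNotPrefBlock rest (by decide) (by decide))]
                  exact List.find?_cons_of_pos (by
                    rw [List.isPrefixOf_iff_prefix]; exact List.prefix_append _ _))
                (by decide) (List.append_ne_nil_of_left_ne_nil (by decide) _),
              List.drop_left]
            intro heq
            exact ih rest hlenr hshift (List.append_cancel_left heq)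
          · -- nothing matches at the head: both sides copy one character
            obtain ⟨c, t, rfl⟩ := List.exists_cons_of_ne_nil
              (show cs ≠ [] by
                intro hn; subst hn
                rw [List.infix_nil] at hinf
                exact absurd hinf (by decide))
            have hshift : "suspendeverify".toList <:+: t := by
              rcases (pvInfix_iff_drop _ _).mp hinf with ⟨j, hj⟩
              cases j with
              | zero => exact absurd (by simpa using hj) hp0
              | succ j' =>
                rw [List.drop_succ_cons] at hj
                exact (pvInfix_iff_drop _ _).mpr ⟨_, hj⟩
            have a1 : pvRep "verify".toList "doğrula".toList (c :: t)
                = c :: pvRep "verify".toList "doğrula".toList t := pvRep_copy hv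
            have hnos : ¬ "suspended".toList <+:
                (c :: pvRep "verify".toList "doğrula".toList t) := by
              intro hpre
              rw [show "suspended".toList = 's' :: "uspended".toList from by decide,
                List.cons_prefix_cons] at hpre
              obtain ⟨rfl, hpre'⟩ := hpre
              rcases pvPref (by decide) t.length t "uspended".toList le_rfl
                  (fun s hs hsuf => by
                    intro hand
                    have hseq : s = "uspended".toList.drop
                        (("uspended".toList).length - s.length) :=
                      List.suffix_iff_eq_drop.mp hsuf
                    have hall : ∀ i < ("uspended".toList).length + 1,
                        ¬ ("doğrula".toList <+: "uspended".toList.drop i ∧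
                            "doğrula".toList ≠ "uspended".toList.drop i) := by decide
                    exact hall _ (by omega) (hseq ▸ hand)) hpre' with h | ⟨X, Y, hXY, hYn, hYv, hXo⟩
              · exact hs (by
                  rw [show "suspended".toList = 's' :: "uspended".toList from by decide]
                  exact List.cons_prefix_cons.mpr ⟨rfl, h⟩)
              · have hYeq : Y = "uspended".toList.drop X.length := by
                  rw [hXY, List.drop_left]
                have hXeq : X = "uspended".toList.take X.length := by
                  rw [hXY, List.take_left]
                have hYl : 0 < Y.length := List.length_pos_of_ne_nil hYn
                have hlen8 : ("uspended".toList).length = X.length + Y.length := by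
                  rw [hXY]; simp
                have h7 : ∀ i < ("uspended".toList).length,
                    ("uspended".toList.drop i <+: "doğrula".toList) → i = 7 := by decide
                have hx7 : X.length = 7 :=
                  h7 X.length (by
                    simp only [show ("uspended".toList).length = 8 from by decide] at hlen8 ⊢
                    omega) (hYeq ▸ hYv)
                have hXis : X = "uspende".toList := by rw [hXeq, hx7]; decide
                refine hp0 ?_
                rw [show "suspendeverify".toList
                    = 's' :: ("uspende".toList ++ "verify".toList) from by decide]
                exact List.cons_prefix_cons.mpr ⟨rfl, hXis ▸ hXo⟩
            have a2 : pvRep "suspended".toList "askıya alındı".toList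
                  (c :: pvRep "verify".toList "doğrula".toList t)
                = c :: pvRep "suspended".toList "askıya alındı".toList
                    (pvRep "verify".toList "doğrula".toList t) := pvRep_copy hnos
            have hnoc : ¬ "click".toList <+:
                (c :: pvRep "suspended".toList "askıya alındı".toList
                  (pvRep "verify".toList "doğrula".toList t)) := by
              intro hpre
              rw [show "click".toList = 'c' :: "lick".toList from by decide,
                List.cons_prefix_cons] at hpre
              obtain ⟨rfl, hpre'⟩ := hpre
              rcases pvPref (by decide)
                  (pvRep "verify".toList "doğrula".toList t).length
                  (pvRep "verify".toList "doğrula".toList t) "lick".toList le_rfl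
                  (fun s hs hsuf => by
                    intro hand
                    have h1 := hand.1.length_le
                    have h2 := hsuf.length_le
                    simp only [show ("askıya alındı".toList).length = 13 from by decide,
                      show ("lick".toList).length = 4 from by decide] at h1 h2
                    omega) hpre' with h | ⟨X, Y, hXY, hYn, hYv, hXo⟩
              · rcases pvPref (by decide) t.length t "lick".toList le_rfl
                    (fun s hs hsuf => by
                      intro hand
                      have h1 := hand.1.length_le
                      have h2 := hsuf.length_le
                      simp only [show ("doğrula".toList).length = 7 from by decide,
                        show ("lick".toList).length = 4 from by decide] at h1 h2
                      omega) h with h' | ⟨X, Y, hXY, hYn, hYv, hXo⟩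
                · exact hc (by
                    rw [show "click".toList = 'c' :: "lick".toList from by decide]
                    exact List.cons_prefix_cons.mpr ⟨rfl, h'⟩)
                · have hYeq : Y = "lick".toList.drop X.length := by rw [hXY, List.drop_left]
                  have hYl : 0 < Y.length := List.length_pos_of_ne_nil hYn
                  have hlen4 : ("lick".toList).length = X.length + Y.length := by
                    rw [hXY]; simp
                  have h4 : ∀ i < 4, ¬ ("lick".toList.drop i <+: "doğrula".toList) := by decide
                  exact h4 X.length (by
                    simp only [show ("lick".toList).length = 4 from by decide] at hlen4
                    omega) (hYeq ▸ hYv)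
              · have hYeq : Y = "lick".toList.drop X.length := by rw [hXY, List.drop_left]
                have hYl : 0 < Y.length := List.length_pos_of_ne_nil hYn
                have hlen4 : ("lick".toList).length = X.length + Y.length := by
                  rw [hXY]; simp
                have h4 : ∀ i < 4, ¬ ("lick".toList.drop i <+: "askıya alındı".toList) := by decide
                exact h4 X.length (by
                  simp only [show ("lick".toList).length = 4 from by decide] at hlen4
                  omega) (hYeq ▸ hYv)
            have a3 : pvRep "click".toList "tıkla".toList
                  (c :: pvRep "suspended".toList "askıya alındı".toList
                    (pvRep "verify".toList "doğrula".toList t))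
                = c :: pvRep "click".toList "tıkla".toList
                    (pvRep "suspended".toList "askıya alındı".toList
                      (pvRep "verify".toList "doğrula".toList t)) := pvRep_copy hnoc
            have hfind : (([("verify".toList, "doğrula".toList),
                  ("suspended".toList, "askıya alındı".toList),
                  ("click".toList, "tıkla".toList)] : List (List Char × List Char)).find?
                  (fun p => p.1.isPrefixOf (c :: t))) = none := by
              rw [List.find?_eq_none]
              intro p hp hpre
              rw [List.isPrefixOf_iff_prefix] at hpre
              simp only [List.mem_cons, List.not_mem_nil, or_false] at hp
              rcases hp with rfl | rfl | rfl
              · exact hv hpre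
              · exact hs hpre
              · exact hc hpre
            rw [a1, a2, a3, pvScan_copy hfind]
            intro heq
            injection heq with _ h2
            exact ih t (by simpa using Nat.lt_succ_iff.mp (by simpa using hlen)) hshift h2

-- ===== VERDICT (by name: the statement is the Claim_ definition above) =====
theorem mock_translate_py_spec : Claim_unchanged_mock_translate_py := by
  unfold Claim_unchanged_mock_translate_py
  intro text tl _hdom
  unfold Spec_mock_translate_py
  intro hnD
  by_cases h1 : tl = "es"
  · subst h1
    rw [pvAltKnown text "es" pvTblES rfl rfl]
    unfold mock_translate_py
    dsimp only
    rw [show (pvTranslations.getD "es" PySem.Dict.empty).items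
        = [("urgent", "urgente"), ("account", "cuenta"), ("verify", "verificar"),
           ("suspended", "suspendido"), ("click", "hacer clic")] from by decide,
      pvAssemble text.toList _ pvTblES (by decide) (pvCentral text.toList pvTblES (by decide))]
  by_cases h2 : tl = "fr"
  · subst h2
    rw [pvAltKnown text "fr" pvTblFR rfl rfl]
    unfold mock_translate_py
    dsimp only
    rw [show (pvTranslations.getD "fr" PySem.Dict.empty).items
        = [("urgent", "urgent"), ("account", "compte"), ("verify", "vérifier"),
           ("suspended", "suspendu"), ("click", "cliquez")] from by decide,
      pvAssemble text.toList _ pvTblFR (by decide) (pvCentral text.toList pvTblFR (by decide))]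
  by_cases h3 : tl = "malayalam"
  · subst h3
    rw [pvAltKnown text "malayalam" pvTblML rfl rfl]
    unfold mock_translate_py
    dsimp only
    rw [show (pvTranslations.getD "malayalam" PySem.Dict.empty).items
        = [("urgent", "അടിയന്തരം"), ("account", "അക്കൗണ്ട്"), ("verify", "പരിശോധിക്കുക"),
           ("suspended", "സസ്പെന്റഡ്"), ("click", "ക്ലിക്ക് ചെയ്യുക")] from by decide,
      pvAssemble text.toList _ pvTblML (by decide) (pvCentral text.toList pvTblML (by decide))]
  by_cases h4 : tl = "turkish"
  · subst h4
    have hcore : pvTblTR.foldl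
        (fun r p => if PySem.Chars.isIn p.1 (PySem.Chars.lower text.toList) = true
          then PySem.Chars.replace r p.1 p.2 else r) text.toList = pvScan pvTblTR text.toList := by
      cases hsusp : PySem.Chars.isIn "suspended".toList (PySem.Chars.lower text.toList) with
      | false => exact pvTurkA text.toList hsusp
      | true =>
        have hpat : ¬ "suspendeverify".toList <:+: text.toList := by
          intro hinf
          refine hnD ⟨rfl, ?_, ?_⟩
          · rw [PySem.Str.isIn_iff_infix]; exact hinf
          · have : PySem.Chars.isIn "suspended".toList
                (PySem.Chars.lower text.toList) = true := hsusp
            simpa [PySem.Str.isIn, PySem.Chars.isIn] using this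
        rw [pvReplFold text.toList pvTblTR (by decide)]
        exact pvTurkB text.toList hsusp hpat
    rw [pvAltKnown text "turkish" pvTblTR rfl rfl]
    unfold mock_translate_py
    dsimp only
    rw [show (pvTranslations.getD "turkish" PySem.Dict.empty).items
        = [("urgent", "acil"), ("account", "hesap"), ("verify", "doğrula"),
           ("suspended", "askıya alındı"), ("click", "tıkla")] from by decide,
      pvAssemble text.toList _ pvTblTR (by decide) hcore]
  · -- unknown language: empty table on both sides
    have hTf : pvTableFor tl = [] := by
      unfold pvTableFor
      rw [if_neg h1, if_neg h2, if_neg h3, if_neg h4]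
    rw [pvAltUnknown text tl hTf]
    unfold mock_translate_py
    dsimp only
    have hempty : pvTranslations.getD tl PySem.Dict.empty = PySem.Dict.empty := by
      rw [PySem.Dict.getD_of_not_contains]
      simp only [pvTranslations, PySem.Dict.contains_mk]
      simp [Ne.symm h1, Ne.symm h2, Ne.symm h3, Ne.symm h4]
    rw [hempty,
      show (PySem.Dict.empty : PySem.Dict String String).items = [] from rfl]
    rfl

theorem mock_translate_py_changed : Claim_changed_mock_translate_py := by
  unfold Claim_changed_mock_translate_py; decide

theorem mock_translate_py_tight : Claim_exact_mock_translate_py := by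
  unfold Claim_exact_mock_translate_py
  intro text tl _hdom hD
  obtain ⟨htl, hpS, hsS⟩ := hD
  subst htl
  have hpat : "suspendeverify".toList <:+: text.toList := (PySem.Str.isIn_iff_infix _ _).mp hpS
  have hsusp : PySem.Chars.isIn "suspended".toList (PySem.Chars.lower text.toList) = true := by
    have h := (PySem.Str.isIn_iff_infix _ _).mp hsS
    rw [PySem.Str.toList_lower] at h
    exact (PySem.Chars.isIn_iff_infix _ _).mpr h
  intro heq
  rw [pvAltKnown text "turkish" pvTblTR rfl rfl] at heq
  unfold mock_translate_py at heq
  dsimp only at heq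
  rw [show (pvTranslations.getD "turkish" PySem.Dict.empty).items
      = [("urgent", "acil"), ("account", "hesap"), ("verify", "doğrula"),
         ("suspended", "askıya alındı"), ("click", "tıkla")] from by decide] at heq
  have heqL := congrArg String.toList heq
  simp only [String.toList_ofList] at heqL
  have heq3 := List.append_cancel_left heqL
  injection heq3 with _ heq4
  injection heq4 with _ heq5
  have hA1 : ([("urgent", "acil"), ("account", "hesap"), ("verify", "doğrula"),
        ("suspended", "askıya alındı"), ("click", "tıkla")] : List (String × String)).foldl
        (fun r p => if PySem.Chars.isIn p.1.toList (PySem.Chars.lower text.toList) = true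
          then PySem.Chars.replace r p.1.toList p.2.toList else r) text.toList
      = pvTblTR.foldl
        (fun r p => if PySem.Chars.isIn p.1 (PySem.Chars.lower text.toList) = true
          then PySem.Chars.replace r p.1 p.2 else r) text.toList := by
    rw [show pvTblTR = ([("urgent", "acil"), ("account", "hesap"), ("verify", "doğrula"),
        ("suspended", "askıya alındı"), ("click", "tıkla")] : List (String × String)).map
          (fun p => (p.1.toList, p.2.toList)) from by decide, List.foldl_map]
  have hB1 : pvScanGo pvTblTR text.toList.length text.toList = pvScan pvTblTR text.toList := rfl
  have hp1 : "suspendeverify".toList <:+: pvRep "urgent".toList "acil".toList text.toList :=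
    pvPreserve (by decide) (by decide) (by decide) (pvB_of_idx (by decide))
      (pvB_of_idx (by decide)) text.toList.length text.toList le_rfl hpat
  have hp2 : "suspendeverify".toList <:+:
      pvRep "account".toList "hesap".toList (pvRep "urgent".toList "acil".toList text.toList) :=
    pvPreserve (by decide) (by decide) (by decide) (pvB_of_idx (by decide))
      (pvB_of_idx (by decide)) _ _ le_rfl hp1
  have hcalc : pvRep "click".toList "tıkla".toList
        (pvRep "suspended".toList "askıya alındı".toList
          (pvRep "verify".toList "doğrula".toList
            (pvRep "account".toList "hesap".toList
              (pvRep "urgent".toList "acil".toList text.toList))))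
      = pvScan [("verify".toList, "doğrula".toList),
          ("suspended".toList, "askıya alındı".toList), ("click".toList, "tıkla".toList)]
          (pvRep "account".toList "hesap".toList
            (pvRep "urgent".toList "acil".toList text.toList)) := by
    calc _ = pvTblTR.foldl
            (fun r p => if PySem.Chars.isIn p.1 (PySem.Chars.lower text.toList) = true
              then pvRep p.1 p.2 r else r) text.toList := (pvTurkFold text.toList hsusp).symm
      _ = pvTblTR.foldl
            (fun r p => if PySem.Chars.isIn p.1 (PySem.Chars.lower text.toList) = true
              then PySem.Chars.replace r p.1 p.2 else r) text.toList :=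
          (pvReplFold text.toList pvTblTR (by decide)).symm
      _ = _ := hA1.symm
      _ = _ := heq5
      _ = pvScan pvTblTR text.toList := hB1
      _ = _ := pvTurkF1 text.toList
      _ = _ := pvTurkF2 _
  exact pvDiff _ _ le_rfl hp2 hcalc
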